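-- pv_equiv track=rewrite | github.com/SanyaTravka/Matrix | Matrix.py | PlusOrMinusMatr
-- ===== SOURCE A (Python) =====
-- def Zeros(row,col):
--     rez = []
--     for i in range(row):
--         st = []
--         for j in range(col):
--             st.append(0)
--         rez.append(st)
--     return rez
--
-- def PlusOrMinusMatr(matr):
--     def IsEven(num):
--         if (num % 2 == 0):
--             return True
--         return False
--
--     n = len(matr)
--     matrZn = Zeros(n,n)
--     for i in range(n):
--         for j in range(n):
--             if IsEven(i):
--                 if IsEven(j):
--                     matrZn[i][j] = 1
--                 else:
--                     matrZn[i][j] = -1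
--             else:
--                 if IsEven(j):
--                     matrZn[i][j] = -1
--                 else:
--                     matrZn[i][j] = 1
--     return matrZn
-- ===== SOURCE B (Python) =====
-- def PlusOrMinusMatr(matr):
--     n = len(matr)
--     if n == 0:
--         return []
--     row = [1 if j % 2 == 0 else -1 for j in range(n)]
--     rows = [row]
--     for _ in range(n - 1):
--         row = [-x for x in row]
--         rows.append(row)
--     return rows
-- ===== Notes on version B (the rewrite author's own statement) =====
-- stated objective: alternative
-- what changed: Instead of allocating a zero matrix and overwriting each cell from the parities of i and j, B builds only the first checkerboard row and derives each subsequent row by negating the previous one, appending rows as it goes.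
import Mathlib
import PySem

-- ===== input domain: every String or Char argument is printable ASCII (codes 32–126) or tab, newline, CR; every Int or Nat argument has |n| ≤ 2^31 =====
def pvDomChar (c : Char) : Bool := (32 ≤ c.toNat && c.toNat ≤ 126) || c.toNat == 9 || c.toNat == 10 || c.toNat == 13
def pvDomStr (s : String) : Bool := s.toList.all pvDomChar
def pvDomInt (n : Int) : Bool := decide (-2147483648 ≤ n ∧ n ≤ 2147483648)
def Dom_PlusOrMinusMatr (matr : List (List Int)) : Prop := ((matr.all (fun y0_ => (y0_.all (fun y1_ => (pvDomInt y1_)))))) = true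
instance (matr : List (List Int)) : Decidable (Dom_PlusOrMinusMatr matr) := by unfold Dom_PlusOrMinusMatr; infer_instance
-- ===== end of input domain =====

-- B builds the first checkerboard row and derives each next row by negating the previous one,
-- instead of A's zero-matrix allocation plus cell-by-cell parity assignment (alternative decomposition, same cost).


-- ===== PORT A =====
def pvZeros (row col : Int) : List (List Int) :=
  (PySem.List.pyRange 0 row 1).foldl (fun rez _ =>
    rez ++ [(PySem.List.pyRange 0 col 1).foldl (fun st _ => st ++ [(0 : Int)]) ([] : List Int)]) []

def pvIsEven (num : Int) : Bool := if PySem.Int.mod num 2 == 0 then true else false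

def PlusOrMinusMatr (matr : List (List Int)) : List (List Int) :=
  let n : Int := matr.length
  let matrZn := pvZeros n n
  (PySem.List.pyRange 0 n 1).foldl (fun m i =>
    (PySem.List.pyRange 0 n 1).foldl (fun m j =>
      PySem.List.pySetD m i (PySem.List.pySetD (PySem.List.pyGetD m i []) j
        (if pvIsEven i then (if pvIsEven j then (1 : Int) else -1)
         else (if pvIsEven j then -1 else 1)))) m) matrZn

-- ===== PORT B =====
def PlusOrMinusMatr_alt (matr : List (List Int)) : List (List Int) :=
  let n : Int := matr.length
  if n == 0 then []
  else
    let row := (PySem.List.pyRange 0 n 1).map (fun j => if PySem.Int.mod j 2 == 0 then (1 : Int) else -1)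
    ((PySem.List.pyRange 0 (n - 1) 1).foldl
      (fun (p : List (List Int) × List Int) _ =>
        let r := p.2.map (fun x => -x)
        (p.1 ++ [r], r)) ([row], row)).1

-- ===== PRECONDITION & SPEC =====
def Spec_PlusOrMinusMatr (matr : List (List Int)) (out : List (List Int)) : Prop := out = PlusOrMinusMatr_alt matr
instance (matr : List (List Int)) (out : List (List Int)) : Decidable (Spec_PlusOrMinusMatr matr out) := by unfold Spec_PlusOrMinusMatr; infer_instance

-- ===== CLAIM (what is proved, stated in full; the proofs are below) =====
def Claim_equal_PlusOrMinusMatr : Prop := ∀ (matr : List (List Int)), Dom_PlusOrMinusMatr matr → Spec_PlusOrMinusMatr matr (PlusOrMinusMatr matr)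

-- ===== LEMMAS AND PROOFS =====

def pvSign (i j : Nat) : Int := if (i + j) % 2 = 0 then 1 else -1
def pvRow (n i : Nat) : List Int := (List.range n).map (fun j => pvSign i j)
def pvModel (n : Nat) : List (List Int) := (List.range n).map (pvRow n)

theorem pvMod_natCast (k : Nat) : (PySem.Int.mod (k : Int) 2 == 0) = decide (k % 2 = 0) := by
  simp only [PySem.Int.mod]
  rcases Nat.even_or_odd k with h | h
  · obtain ⟨c, hc⟩ := h
    have h2 : ((k : Int)).fmod 2 = 0 := by
      have hk : (k : Int) = 2 * c := by omega
      rw [hk, Int.fmod_eq_emod]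
      omega
    simp [h2]
    omega
  · obtain ⟨c, hc⟩ := h
    have h2 : ((k : Int)).fmod 2 = 1 := by
      have hk : (k : Int) = 2 * c + 1 := by omega
      rw [hk, Int.fmod_eq_emod]
      omega
    simp [h2]
    omega

theorem pvIsEven_natCast (k : Nat) : pvIsEven (k : Int) = decide (k % 2 = 0) := by
  unfold pvIsEven
  rw [pvMod_natCast]
  cases h : decide (k % 2 = 0) <;> simp

theorem pvEntry_eq (i j : Nat) :
    (if pvIsEven (i : Int) then (if pvIsEven (j : Int) then (1 : Int) else -1)
     else (if pvIsEven (j : Int) then -1 else 1)) = pvSign i j := by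
  rw [pvIsEven_natCast, pvIsEven_natCast]
  unfold pvSign
  by_cases h1 : i % 2 = 0 <;> by_cases h2 : j % 2 = 0 <;> simp [h1, h2] <;> omega

theorem pvFill {α : Type} (f : Nat → α) :
    ∀ (n : Nat) (row : List α), n ≤ row.length →
      (List.range n).foldl (fun st j => st.set j (f j)) row = (List.range n).map f ++ row.drop n := by
  intro n
  induction n with
  | zero => simp
  | succ m ih =>
    intro row hlen
    rw [List.range_succ, List.foldl_append, ih row (by omega)]
    have hm : m < row.length := by omega
    simp only [List.foldl_cons, List.foldl_nil]
    rw [List.set_append, List.map_append]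
    simp only [List.length_map, List.length_range, lt_irrefl, Nat.sub_self]
    rw [List.drop_eq_getElem_cons hm, List.set_cons_zero]
    simp [List.append_assoc]

theorem pvConstAppend {α β : Type} (c : α) :
    ∀ (l : List β) (init : List α),
      l.foldl (fun acc _ => acc ++ [c]) init = init ++ List.replicate l.length c := by
  intro l
  induction l with
  | nil => simp
  | cons x xs ih =>
    intro init
    simp only [List.foldl_cons, ih, List.length_cons]
    rw [List.append_assoc, List.singleton_append, ← List.replicate_succ]

theorem pvZeros_eq (n : Nat) :
    pvZeros (n : Int) (n : Int) = List.replicate n (List.replicate n (0 : Int)) := by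
  unfold pvZeros
  rw [pvConstAppend, pvConstAppend]
  simp [PySem.List.length_pyRange_one]

theorem pvInner_eq (i : Nat) (g : Int → Int) :
    ∀ (js : List Int) (m : List (List Int)), i < m.length →
      js.foldl (fun m j => PySem.List.pySetD m (i : Int)
        (PySem.List.pySetD (PySem.List.pyGetD m (i : Int) []) j (g j))) m
      = m.set i (js.foldl (fun st j => PySem.List.pySetD st j (g j)) (m.getD i [])) := by
  intro js
  induction js with
  | nil =>
    intro m hm
    simp only [List.foldl_nil, List.getD, List.getElem?_eq_getElem hm, Option.getD_some]
    exact (List.set_getElem_self hm).symm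
  | cons j js ih =>
    intro m hm
    simp only [List.foldl_cons]
    rw [ih _ (by simpa using hm)]
    simp only [PySem.List.pySetD_natCast, PySem.List.pyGetD_natCast, List.set_set]
    congr 1
    have hgd : (m.set i (PySem.List.pySetD (m.getD i []) j (g j))).getD i ([] : List Int)
        = PySem.List.pySetD (m.getD i []) j (g j) := by
      simp [List.getD, hm]
    rw [hgd]

theorem pvRowFill (i n : Nat) (row : List Int) (hlen : row.length = n) :
    ((List.range n).map (fun (k : Nat) => (k : Int))).foldl
      (fun st j => PySem.List.pySetD st j
        (if pvIsEven (i : Int) then (if pvIsEven j then (1 : Int) else -1)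
         else (if pvIsEven j then -1 else 1))) row = pvRow n i := by
  rw [List.foldl_map]
  have hb : ∀ (st : List Int) (j : Nat), PySem.List.pySetD st ((j : Nat) : Int)
        (if pvIsEven (i : Int) then (if pvIsEven ((j : Nat) : Int) then (1 : Int) else -1)
         else (if pvIsEven ((j : Nat) : Int) then -1 else 1)) = st.set j (pvSign i j) := by
    intro st j
    rw [pvEntry_eq]
    simp
  simp only [hb]
  rw [pvFill (fun j => pvSign i j) n row (by omega)]
  simp [pvRow, hlen]

theorem pvOuter_eq (n : Nat) :
    ∀ (is_ : List Nat) (m : List (List Int)), m.length = n → (∀ r ∈ m, r.length = n) →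
      (∀ i ∈ is_, i < n) →
      is_.foldl (fun m (i : Nat) =>
        ((List.range n).map (fun (k : Nat) => (k : Int))).foldl (fun m j =>
          PySem.List.pySetD m ((i : Nat) : Int)
            (PySem.List.pySetD (PySem.List.pyGetD m ((i : Nat) : Int) []) j
              (if pvIsEven ((i : Nat) : Int) then (if pvIsEven j then (1 : Int) else -1)
               else (if pvIsEven j then -1 else 1)))) m) m
      = is_.foldl (fun m i => m.set i (pvRow n i)) m := by
  intro is_
  induction is_ with
  | nil => intro m _ _ _; rfl
  | cons i is_ ih =>
    intro m hlen hrows his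
    have hi : i < n := his i (List.mem_cons_self ..)
    simp only [List.foldl_cons]
    rw [pvInner_eq i _ _ m (by omega)]
    have hm : i < m.length := by omega
    have hrowlen : (m.getD i []).length = n := by
      rw [List.getD_eq_getElem _ _ hm]
      exact hrows _ (List.getElem_mem hm)
    rw [pvRowFill i n _ hrowlen]
    apply ih
    · simpa using hlen
    · intro r hr
      rcases List.mem_or_eq_of_mem_set hr with h | h
      · exact hrows r h
      · rw [h]; simp [pvRow]
    · intro x hx
      exact his x (List.mem_cons_of_mem _ hx)

theorem pvA_model (matr : List (List Int)) :
    PlusOrMinusMatr matr = pvModel matr.length := by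
  unfold PlusOrMinusMatr
  simp only []
  rw [pvZeros_eq, PySem.List.pyRange_zero_natCast, List.foldl_map]
  rw [pvOuter_eq matr.length (List.range matr.length) _ (by simp) (by simp) (by simp)]
  rw [pvFill (pvRow matr.length) matr.length _ (by simp)]
  simp [pvModel]

theorem pvNegRow (n i : Nat) : (pvRow n i).map (fun x => -x) = pvRow n (i + 1) := by
  unfold pvRow
  rw [List.map_map]
  apply List.map_congr_left
  intro j _
  simp only [Function.comp_apply, pvSign]
  split_ifs with h1 h2 <;> omega

theorem pvBLoop (n : Nat) :
    ∀ (t : Nat) (acc : List (List Int)) (i : Nat),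
      (List.range t).foldl
        (fun (p : List (List Int) × List Int) _ =>
          (p.1 ++ [p.2.map (fun x => -x)], p.2.map (fun x => -x))) (acc, pvRow n i)
      = (acc ++ (List.range t).map (fun k => pvRow n (i + 1 + k)), pvRow n (i + t)) := by
  intro t
  induction t with
  | zero => intro acc i; simp
  | succ m ih =>
    intro acc i
    rw [List.range_succ, List.foldl_append, ih]
    simp only [List.foldl_cons, List.foldl_nil, pvNegRow]
    have e1 : i + m + 1 = i + 1 + m := by omega
    have e2 : i + (m + 1) = i + 1 + m := by omega
    rw [e1, e2]
    simp [List.append_assoc]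

theorem pvB_model (matr : List (List Int)) :
    PlusOrMinusMatr_alt matr = pvModel matr.length := by
  unfold PlusOrMinusMatr_alt
  simp only []
  by_cases h0 : matr.length = 0
  · rw [h0]
    simp [pvModel]
  · have hne : ¬ ((matr.length : Int) == 0) = true := by
      simp only [beq_iff_eq, Nat.cast_eq_zero]
      exact h0
    rw [if_neg hne]
    have hrow : (PySem.List.pyRange 0 (matr.length : Int) 1).map
        (fun j => if PySem.Int.mod j 2 == 0 then (1 : Int) else -1) = pvRow matr.length 0 := by
      rw [PySem.List.pyRange_zero_natCast, List.map_map]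
      apply List.map_congr_left
      intro j _
      simp only [Function.comp_apply, pvMod_natCast, pvSign]
      by_cases h : j % 2 = 0 <;> simp [h]
    rw [hrow]
    have hcast : ((matr.length : Int) - 1) = ((matr.length - 1 : Nat) : Int) := by
      rw [Nat.cast_sub (by omega : 1 ≤ matr.length)]
      simp
    rw [hcast, PySem.List.pyRange_zero_natCast, List.foldl_map]
    have := pvBLoop matr.length (matr.length - 1) [pvRow matr.length 0] 0
    rw [this]
    simp only []
    unfold pvModel
    have hn : matr.length = (matr.length - 1) + 1 := by omega
    rw [hn, List.range_succ_eq_map]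
    simp only [List.map_cons, List.map_map, List.singleton_append]
    congr 1
    apply List.map_congr_left
    intro k _
    simp only [Function.comp_apply]
    congr 1
    omega

-- ===== VERDICT (by name: the statement is the Claim_ definition above) =====
theorem PlusOrMinusMatr_spec : Claim_equal_PlusOrMinusMatr := by
  intro matr _
  unfold Spec_PlusOrMinusMatr
  rw [pvA_model, pvB_model]
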